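-- pv_equiv track=rewrite | github.com/DerpBicycle/gameindustryreports | process_documents_101_200.py | determine_content_focus
-- ===== SOURCE A (Python) =====
-- def determine_content_focus(text, topics):
--     """Determine content focus areas"""
--     focus_areas = []
--     text_lower = text.lower()
--
--     if 'Market Analysis' in topics or 'Market Growth' in topics:
--         focus_areas.append('Market Analysis')
--     if 'Player Behavior' in topics or 'User Acquisition' in topics:
--         focus_areas.append('User Behavior')
--     if any(t in topics for t in ['VR/AR', 'Cloud Gaming', 'AI & Machine Learning']):
--         focus_areas.append('Technology')
--     if 'Revenue & Monetization' in topics: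
--         focus_areas.append('Business Models')
--     if 'Game Development' in topics:
--         focus_areas.append('Development & Technology')
--     if 'Blockchain & NFT' in topics:
--         focus_areas.append('Blockchain & Web3')
--     if 'Esports' in topics:
--         focus_areas.append('Competitive Gaming')
--
--     if not focus_areas:
--         focus_areas = ['General Industry Analysis']
--
--     return focus_areas[:5]
-- ===== SOURCE B (Python) =====
-- # Inverted index: one pass over topics through a topic->label dict collects the
-- # set of triggered labels; the output is the canonical label order filtered by
-- # that set (rule order == canonical order, so the result matches A exactly).
-- _TOPIC_TO_LABEL = {
--     'Market Analysis': 'Market Analysis',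
--     'Market Growth': 'Market Analysis',
--     'Player Behavior': 'User Behavior',
--     'User Acquisition': 'User Behavior',
--     'VR/AR': 'Technology',
--     'Cloud Gaming': 'Technology',
--     'AI & Machine Learning': 'Technology',
--     'Revenue & Monetization': 'Business Models',
--     'Game Development': 'Development & Technology',
--     'Blockchain & NFT': 'Blockchain & Web3',
--     'Esports': 'Competitive Gaming',
-- }
--
-- _LABEL_ORDER = ['Market Analysis', 'User Behavior', 'Technology', 'Business Models',
--                 'Development & Technology', 'Blockchain & Web3', 'Competitive Gaming']
--
--
-- def determine_content_focus(text, topics):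
--     """Determine content focus areas"""
--     hit = set()
--     for t in topics:
--         label = _TOPIC_TO_LABEL.get(t)
--         if label is not None:
--             hit.add(label)
--     focus_areas = [label for label in _LABEL_ORDER if label in hit]
--     return (focus_areas or ['General Industry Analysis'])[:5]
-- ===== Notes on version B (the rewrite author's own statement) =====
-- stated objective: alternative
-- what changed: Inverts the rule table into a topic-to-label index: one pass over topics collects the set of triggered labels via dict lookup (no per-rule scan of topics), then the canonical label order is filtered by that set; fallback and [:5] truncation kept.
import Mathlib
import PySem

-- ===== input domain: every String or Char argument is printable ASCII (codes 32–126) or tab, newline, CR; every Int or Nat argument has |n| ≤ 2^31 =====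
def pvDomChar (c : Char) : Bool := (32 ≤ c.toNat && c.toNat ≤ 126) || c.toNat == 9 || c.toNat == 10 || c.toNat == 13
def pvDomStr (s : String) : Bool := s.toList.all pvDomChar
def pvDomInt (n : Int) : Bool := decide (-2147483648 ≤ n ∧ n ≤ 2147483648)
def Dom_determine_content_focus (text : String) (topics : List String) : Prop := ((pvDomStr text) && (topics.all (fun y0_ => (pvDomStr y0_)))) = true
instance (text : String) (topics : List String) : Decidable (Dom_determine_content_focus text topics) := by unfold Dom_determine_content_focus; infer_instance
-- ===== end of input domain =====

-- B inverts the rules into a topic→label index: one pass over topics collects the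
-- set of triggered labels, then the canonical label order is filtered by that set
-- (objective: alternative — a different traversal, same output).

-- ===== PORT A =====
def determine_content_focus (text : String) (topics : List String) : List String :=
  let focus_areas : List String := []
  let _text_lower := PySem.Str.lower text
  let focus_areas := if topics.contains "Market Analysis" || topics.contains "Market Growth"
    then focus_areas ++ ["Market Analysis"] else focus_areas
  let focus_areas := if topics.contains "Player Behavior" || topics.contains "User Acquisition"
    then focus_areas ++ ["User Behavior"] else focus_areas
  let focus_areas := if (["VR/AR", "Cloud Gaming", "AI & Machine Learning"] : List String).any
      (fun t => topics.contains t)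
    then focus_areas ++ ["Technology"] else focus_areas
  let focus_areas := if topics.contains "Revenue & Monetization"
    then focus_areas ++ ["Business Models"] else focus_areas
  let focus_areas := if topics.contains "Game Development"
    then focus_areas ++ ["Development & Technology"] else focus_areas
  let focus_areas := if topics.contains "Blockchain & NFT"
    then focus_areas ++ ["Blockchain & Web3"] else focus_areas
  let focus_areas := if topics.contains "Esports"
    then focus_areas ++ ["Competitive Gaming"] else focus_areas
  let focus_areas := if focus_areas = [] then ["General Industry Analysis"] else focus_areas
  PySem.List.slice focus_areas none (some 5)

-- ===== PORT B =====
def pvPairs : List (String × String) :=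
  [ ("Market Analysis", "Market Analysis"),
    ("Market Growth", "Market Analysis"),
    ("Player Behavior", "User Behavior"),
    ("User Acquisition", "User Behavior"),
    ("VR/AR", "Technology"),
    ("Cloud Gaming", "Technology"),
    ("AI & Machine Learning", "Technology"),
    ("Revenue & Monetization", "Business Models"),
    ("Game Development", "Development & Technology"),
    ("Blockchain & NFT", "Blockchain & Web3"),
    ("Esports", "Competitive Gaming") ]

def pvTopicToLabel : PySem.Dict String String := PySem.Dict.mk pvPairs

def pvLabelOrder : List String :=
  [ "Market Analysis", "User Behavior", "Technology", "Business Models",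
    "Development & Technology", "Blockchain & Web3", "Competitive Gaming" ]

def pvAddHit (s : PySem.Set String) (t : String) : PySem.Set String :=
  match PySem.Dict.get? pvTopicToLabel t with
  | some label => PySem.Set.add s label
  | none => s

def determine_content_focus_alt (text : String) (topics : List String) : List String :=
  let hit : PySem.Set String := topics.foldl pvAddHit PySem.Set.empty
  let focus_areas := pvLabelOrder.filter (fun label => PySem.Set.contains hit label)
  (if focus_areas = [] then ["General Industry Analysis"] else focus_areas).take 5

-- ===== PRECONDITION & SPEC =====
def Spec_determine_content_focus (text : String) (topics : List String) (out : List String) : Prop := out = determine_content_focus_alt text topics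
instance (text : String) (topics : List String) (out : List String) : Decidable (Spec_determine_content_focus text topics out) := by unfold Spec_determine_content_focus; infer_instance

-- ===== CLAIM (what is proved, stated in full; the proofs are below) =====
def Claim_equal_determine_content_focus : Prop := ∀ (text : String) (topics : List String), Dom_determine_content_focus text topics → Spec_determine_content_focus text topics (determine_content_focus text topics)

-- ===== LEMMAS AND PROOFS =====

-- get? of a literal dict unfolds one key at a time
theorem pv_get?_chain {ν : Type} (k : String) (v : ν) (rest : List (String × ν)) (t : String) :
    PySem.Dict.get? (PySem.Dict.mk ((k, v) :: rest)) t =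
      (if k == t then some v else PySem.Dict.get? (PySem.Dict.mk rest) t) := by
  simp only [PySem.Dict.get?, List.find?_cons]
  cases h : k == t <;> simp

-- lookup in a dict with distinct keys, as an 'any' over its pairs
theorem pv_get?_any (items : List (String × String)) (t L : String)
    (h : (items.map (·.1)).Nodup) :
    (PySem.Dict.get? (PySem.Dict.mk items) t == some L) =
      items.any (fun p => p.1 == t && p.2 == L) := by
  induction items with
  | nil => simp [PySem.Dict.get?]
  | cons p rest ih =>
    obtain ⟨k, v⟩ := p
    simp only [List.map_cons, List.nodup_cons] at h
    rw [pv_get?_chain, List.any_cons]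
    cases hk : k == t with
    | false => simp [ih h.2]
    | true =>
      have ht : t = k := (eq_of_beq hk).symm
      have hrest : rest.any (fun p => p.1 == t && p.2 == L) = false := by
        subst ht
        simp only [List.any_eq_false]
        intro p hp
        have hne : p.1 ≠ t := fun he => h.1 (he ▸ List.mem_map_of_mem hp)
        simp [hne]
      simp [hrest]

theorem pv_any_or {α : Type} (l : List α) (p q : α → Bool) :
    l.any (fun x => p x || q x) = (l.any p || l.any q) := by
  induction l with
  | nil => simp
  | cons a l ih =>
    simp only [List.any_cons, ih]
    cases p a <;> cases q a <;> cases l.any p <;> cases l.any q <;> rfl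

theorem pv_any_swap {α β : Type} (l1 : List α) (l2 : List β) (g : α → β → Bool) :
    l1.any (fun a => l2.any (fun b => g a b)) = l2.any (fun b => l1.any (fun a => g a b)) := by
  induction l1 with
  | nil => simp
  | cons a l1 ih =>
    simp only [List.any_cons, ih, pv_any_or]

-- membership in the hit set accumulated by the fold
theorem pv_contains_fold (ts : List String) (s : PySem.Set String) (L : String) :
    PySem.Set.contains (ts.foldl pvAddHit s) L =
      (PySem.Set.contains s L || ts.any (fun t => PySem.Dict.get? pvTopicToLabel t == some L)) := by
  induction ts generalizing s with
  | nil => simp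
  | cons t ts ih =>
    simp only [List.foldl_cons, List.any_cons, ih]
    have hstep : PySem.Set.contains (pvAddHit s t) L =
        (PySem.Set.contains s L || (PySem.Dict.get? pvTopicToLabel t == some L)) := by
      unfold pvAddHit
      cases hg : PySem.Dict.get? pvTopicToLabel t with
      | none => simp
      | some lab =>
        by_cases h : lab = L <;>
          simp [PySem.Set.add_eq_ite, h, PySem.Set.contains_eq_listContains] <;>
          · split <;> simp_all [ne_comm]
    rw [hstep, Bool.or_assoc]

-- ===== VERDICT (by name: the statement is the Claim_ definition above) =====
set_option maxHeartbeats 1000000 in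
theorem determine_content_focus_spec : Claim_equal_determine_content_focus := by
  intro _text topics _
  have hnd : (pvPairs.map (·.1)).Nodup := by decide
  have hA : ∀ (t L : String), (PySem.Dict.get? pvTopicToLabel t == some L) =
      pvPairs.any (fun p => p.1 == t && p.2 == L) := by
    intro t L
    rw [pvTopicToLabel, pv_get?_any pvPairs t L hnd]
  unfold Spec_determine_content_focus determine_content_focus determine_content_focus_alt pvLabelOrder
  simp only [List.filter_cons, List.filter_nil, List.any_cons, List.any_nil, Bool.or_false,
    pv_contains_fold, PySem.Set.empty, hA]
  rw [pv_any_swap topics pvPairs (fun t p => p.1 == t && p.2 == "Market Analysis"),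
      pv_any_swap topics pvPairs (fun t p => p.1 == t && p.2 == "User Behavior"),
      pv_any_swap topics pvPairs (fun t p => p.1 == t && p.2 == "Technology"),
      pv_any_swap topics pvPairs (fun t p => p.1 == t && p.2 == "Business Models"),
      pv_any_swap topics pvPairs (fun t p => p.1 == t && p.2 == "Development & Technology"),
      pv_any_swap topics pvPairs (fun t p => p.1 == t && p.2 == "Blockchain & Web3"),
      pv_any_swap topics pvPairs (fun t p => p.1 == t && p.2 == "Competitive Gaming")]
  simp [pvPairs]
  by_cases h1 : "Market Analysis" ∈ topics ∨ "Market Growth" ∈ topics <;>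
  by_cases h2 : "Player Behavior" ∈ topics ∨ "User Acquisition" ∈ topics <;>
  by_cases h3 : "VR/AR" ∈ topics ∨ "Cloud Gaming" ∈ topics ∨ "AI & Machine Learning" ∈ topics <;>
  by_cases h4 : "Revenue & Monetization" ∈ topics <;>
  by_cases h5 : "Game Development" ∈ topics <;>
  by_cases h6 : "Blockchain & NFT" ∈ topics <;>
  by_cases h7 : "Esports" ∈ topics <;>
  simp [h1, h2, h3, h4, h5, h6, h7] <;> rfl
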